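-- pv_equiv track=rewrite | github.com/EvgeniyAzarov/competitive-programming | codeforces/cfround784/c.py | check_parity
-- ===== SOURCE A (Python) =====
-- def check_parity(arr):
--     if len(arr) == 0:
--         return True
--     x = arr[0] % 2
--     for a in arr:
--         if a % 2 != x:
--             return False
--     return True
-- ===== SOURCE B (Python) =====
-- def check_parity(arr):
--     # All elements share a parity iff every adjacent pair differs by an even number
--     # (parity equality is transitive along the chain of neighbours).
--     return all((x - y) % 2 == 0 for x, y in zip(arr, arr[1:]))
-- ===== Notes on version B (the rewrite author's own statement) =====
-- stated objective: simpler
-- what changed: Instead of anchoring on the first element's parity and scanning with early exit, B checks the chain of adjacent pairs: every neighbouring pair must differ by an even amount (all over zip(arr, arr[1:])); correctness follows from transitivity of parity equality.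
import Mathlib
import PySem

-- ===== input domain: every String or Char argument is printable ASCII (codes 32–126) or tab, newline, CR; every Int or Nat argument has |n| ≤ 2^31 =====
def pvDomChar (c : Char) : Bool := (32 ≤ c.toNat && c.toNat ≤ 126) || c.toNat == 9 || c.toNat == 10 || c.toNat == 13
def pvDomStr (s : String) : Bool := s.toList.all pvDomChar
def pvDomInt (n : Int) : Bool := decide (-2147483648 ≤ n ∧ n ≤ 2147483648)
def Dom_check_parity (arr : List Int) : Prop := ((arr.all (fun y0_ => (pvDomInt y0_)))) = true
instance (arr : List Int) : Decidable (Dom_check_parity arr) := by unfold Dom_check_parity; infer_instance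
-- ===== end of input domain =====

-- B replaces A's scan comparing each element against the first element's parity (with early
-- exit) by an adjacent-pair check over zip(arr, arr[1:]): every neighbouring pair must differ
-- by an even amount; transitivity of parity equality makes the two equivalent.

-- ===== PORT A =====
-- the 'for a in arr' loop with early 'return False'
def checkLoopA (x : Int) : List Int → Bool
  | [] => true
  | a :: rest => if PySem.Int.mod a 2 ≠ x then false else checkLoopA x rest

def check_parity (arr : List Int) : Bool :=
  match arr with
  | [] => true
  | a0 :: _ => checkLoopA (PySem.Int.mod a0 2) arr

-- ===== PORT B =====
def check_parity_alt (arr : List Int) : Bool :=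
  (arr.zip (PySem.List.slice arr (some 1) none)).all
    (fun p => PySem.Int.mod (p.1 - p.2) 2 == 0)

-- ===== PRECONDITION & SPEC =====
def Spec_check_parity (arr : List Int) (out : Bool) : Prop := out = check_parity_alt arr
instance (arr : List Int) (out : Bool) : Decidable (Spec_check_parity arr out) := by unfold Spec_check_parity; infer_instance

-- ===== CLAIM =====
def Claim_equal_check_parity : Prop := ∀ (arr : List Int), Dom_check_parity arr → Spec_check_parity arr (check_parity arr)

-- ===== LEMMAS AND PROOFS =====

theorem checkLoopA_iff (x : Int) (l : List Int) :
    checkLoopA x l = true ↔ ∀ a ∈ l, PySem.Int.mod a 2 = x := by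
  induction l with
  | nil => simp [checkLoopA]
  | cons a rest ih =>
    unfold checkLoopA
    split_ifs with h
    · exact ⟨fun hf => absurd hf (by simp), fun hall => absurd (hall a List.mem_cons_self) h⟩
    · rw [not_not] at h
      rw [ih]
      constructor
      · intro hr a' ha'
        rcases List.mem_cons.mp ha' with rfl | hm
        · exact h
        · exact hr a' hm
      · exact fun hall a' ha' => hall a' (List.mem_cons_of_mem _ ha')

theorem pair_even_iff (x y : Int) :
    (PySem.Int.mod (x - y) 2 == 0) = true ↔ PySem.Int.mod x 2 = PySem.Int.mod y 2 := by
  rw [beq_iff_eq, PySem.Int.mod_eq_zero_iff_dvd,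
      PySem.Int.mod_eq_emod_of_pos (a := x) (by omega),
      PySem.Int.mod_eq_emod_of_pos (a := y) (by omega)]
  omega

theorem adj_iff (a0 : Int) (rest : List Int) :
    (((a0 :: rest).zip rest).all (fun p => PySem.Int.mod (p.1 - p.2) 2 == 0)) = true ↔
    ∀ a ∈ a0 :: rest, PySem.Int.mod a 2 = PySem.Int.mod a0 2 := by
  induction rest generalizing a0 with
  | nil => simp
  | cons a1 rest ih =>
    simp only [List.zip_cons_cons, List.all_cons, Bool.and_eq_true, pair_even_iff, ih a1]
    constructor
    · rintro ⟨h01, h⟩ a ha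
      rcases List.mem_cons.mp ha with rfl | ha'
      · rfl
      · rw [h a ha', ← h01]
    · intro h
      have h01 := (h a1 (by simp)).symm
      refine ⟨h01, fun a ha => ?_⟩
      rw [h a (List.mem_cons_of_mem _ ha), ← h01]

-- ===== VERDICT =====
theorem check_parity_spec : Claim_equal_check_parity := by
  intro arr _
  show check_parity arr = check_parity_alt arr
  cases arr with
  | nil => rfl
  | cons a0 rest =>
    rw [Bool.eq_iff_iff]
    simp only [check_parity, check_parity_alt, PySem.List.slice_from_one, List.tail_cons]
    rw [checkLoopA_iff, adj_iff]
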